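-- pv_equiv track=rewrite | github.com/carlingkirk/ircportland | core/irc.py | zip_channels
-- ===== SOURCE A (Python) =====
-- def zip_channels(channels):
--     channels.sort(key=lambda x: ' ' not in x)  # keyed channels first
--     chans = []
--     keys = []
--     for channel in channels:
--         if ' ' in channel:
--             chan, key = channel.split(' ')
--             chans.append(chan)
--             keys.append(key)
--         else:
--             chans.append(channel)
--     chans = ','.join(chans)
--     if keys:
--         return [chans, ','.join(keys)]
--     else:
--         return [chans]
-- ===== SOURCE B (Python) =====
-- def zip_channels(channels):
--     # Staged declarative passes instead of sorting by a boolean key and looping: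
--     # filter the keyed channels, split them once, project names/keys, then the
--     # unkeyed ones; keyed channels come first, each group in original order.
--     # (Unlike A, this does not reorder `channels` in place.)
--     keyed = [c.split(' ') for c in channels if ' ' in c]
--     names = [p[0] for p in keyed]
--     keys = [p[1] for p in keyed]
--     unkeyed = [c for c in channels if ' ' not in c]
--     chans = ','.join(names + unkeyed)
--     return [chans, ','.join(keys)] if keys else [chans]
-- ===== Notes on version B (the rewrite author's own statement) =====
-- stated objective: alternative
-- what changed: Replaces the stable sort on a boolean key followed by an accumulator loop with staged declarative filter/map passes (split keyed channels once, project names and keys, append unkeyed channels); B also does not reorder the input list in place.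
import Mathlib
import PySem

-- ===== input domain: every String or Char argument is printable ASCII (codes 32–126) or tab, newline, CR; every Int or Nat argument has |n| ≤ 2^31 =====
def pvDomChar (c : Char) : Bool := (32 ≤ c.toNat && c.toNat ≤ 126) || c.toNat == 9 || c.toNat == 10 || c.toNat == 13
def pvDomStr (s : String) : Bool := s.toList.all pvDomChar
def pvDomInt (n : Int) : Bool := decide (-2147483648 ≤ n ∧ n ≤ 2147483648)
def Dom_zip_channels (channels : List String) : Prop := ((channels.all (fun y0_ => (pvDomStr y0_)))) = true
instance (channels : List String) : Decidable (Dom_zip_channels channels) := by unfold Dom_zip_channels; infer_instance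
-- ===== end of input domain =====

-- B replaces A's stable boolean-key sort + accumulator loop with staged filter/map passes;
-- equivalence is about the RETURN value only: A sorts the caller's list in place, B does not.

-- ===== PORT A =====
-- A's `chan, key = channel.split(' ')` (exactly two parts under Pre_)
def zcName (c : String) : String := ((PySem.Str.split? c " ").getD []).getD 0 ""
def zcKey (c : String) : String := ((PySem.Str.split? c " ").getD []).getD 1 ""

def zip_channels (channels : List String) : List String :=
  -- channels.sort(key=lambda x: ' ' not in x)
  let chs := PySem.List.sorted channels (fun x => !(PySem.Str.isIn " " x))
  let st := chs.foldl (fun (st : List String × List String) channel =>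
      if PySem.Str.isIn " " channel then
        (st.1 ++ [zcName channel], st.2 ++ [zcKey channel])
      else
        (st.1 ++ [channel], st.2)) ([], [])
  let chans := PySem.Str.join "," st.1
  if st.2 ≠ [] then [chans, PySem.Str.join "," st.2] else [chans]

-- ===== PORT B =====
def zip_channels_alt (channels : List String) : List String :=
  let keyed := (channels.filter (fun c => PySem.Str.isIn " " c)).map
      (fun c => (PySem.Str.split? c " ").getD [])
  let names := keyed.map (fun p => p.getD 0 "")
  let keys := keyed.map (fun p => p.getD 1 "")
  let unkeyed := channels.filter (fun c => !(PySem.Str.isIn " " c))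
  let chans := PySem.Str.join "," (names ++ unkeyed)
  if keys ≠ [] then [chans, PySem.Str.join "," keys] else [chans]

-- ===== PRECONDITION & SPEC =====
-- Pre_ excludes only inputs where Python A raises ValueError: a channel with two or more
-- spaces makes `chan, key = channel.split(' ')` an unpack of more than two values.
def Pre_zip_channels (channels : List String) : Prop :=
  (channels.all (fun c => PySem.Str.count c " " ≤ 1)) = true
instance (channels : List String) : Decidable (Pre_zip_channels channels) := by
  unfold Pre_zip_channels; infer_instance
def pvWitness_zip_channels : List String := ["#lean key", "#chat"]

def Spec_zip_channels (channels : List String) (out : List String) : Prop := out = zip_channels_alt channels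
instance (channels : List String) (out : List String) : Decidable (Spec_zip_channels channels out) := by unfold Spec_zip_channels; infer_instance

-- ===== CLAIM (what is proved, stated in full; the proofs are below) =====
def Claim_equal_zip_channels : Prop := ∀ (channels : List String), Dom_zip_channels channels → Pre_zip_channels channels → Spec_zip_channels channels (zip_channels channels)

-- ===== LEMMAS AND PROOFS =====

-- A stable sort on a Bool key is the partition: key-false elements first, in order.
theorem insertBy_bool_key {α : Type} (key : α → Bool) (x : α) (A B : List α)
    (hA : ∀ a ∈ A, key a = false) (hB : ∀ b ∈ B, key b = true) :
    PySem.List.insertBy (fun a b => decide (key a < key b)) x (A ++ B) =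
      if key x then A ++ B ++ [x] else A ++ [x] ++ B := by
  cases h : key x with
  | true =>
    rw [if_pos rfl, List.append_assoc,
      PySem.List.insertBy_of_forall_not_before _ x (A ++ B)
        (by intro y _; simp [Bool.lt_iff, h]), List.append_assoc]
  | false =>
    rw [if_neg (by simp)]
    induction A with
    | nil =>
      cases B with
      | nil => simp [PySem.List.insertBy]
      | cons b t =>
        have hb := hB b (by simp)
        simp [PySem.List.insertBy, Bool.lt_iff, h, hb]
    | cons a rest ih =>
      have ha := hA a (by simp)
      have := ih (fun a ha' => hA a (by simp [ha']))
      simp_all [PySem.List.insertBy, Bool.lt_iff, List.cons_append]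

theorem foldl_insertBy_bool_key {α : Type} (key : α → Bool) (xs A B : List α)
    (hA : ∀ a ∈ A, key a = false) (hB : ∀ b ∈ B, key b = true) :
    xs.foldl (fun acc x => PySem.List.insertBy (fun a b => decide (key a < key b)) x acc) (A ++ B) =
      (A ++ xs.filter (fun x => key x = false)) ++ (B ++ xs.filter (fun x => key x = true)) := by
  induction xs generalizing A B with
  | nil => simp
  | cons x xs ih =>
    simp only [List.foldl_cons, insertBy_bool_key key x A B hA hB]
    cases h : key x with
    | false =>
      have := ih (A ++ [x]) B
        (by intro a ha; rcases List.mem_append.1 ha with h' | h'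
            · exact hA a h'
            · simp at h'; simpa [h'] using h) hB
      simp only [Bool.false_eq_true, if_false, List.append_assoc] at this ⊢
      rw [this]
      simp [h]
    | true =>
      have := ih A (B ++ [x]) hA
        (by intro b hb; rcases List.mem_append.1 hb with h' | h'
            · exact hB b h'
            · simp at h'; simpa [h'] using h)
      simp only [if_true, List.append_assoc] at this ⊢
      rw [this]
      simp [h]

theorem sorted_bool_key {α : Type} (key : α → Bool) (xs : List α) :
    PySem.List.sorted xs key =
      xs.filter (fun x => key x = false) ++ xs.filter (fun x => key x = true) := by
  rw [PySem.List.sorted_eq_foldl_insertBy]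
  simpa using foldl_insertBy_bool_key key xs [] [] (by simp) (by simp)

-- A's loop, characterised over any list
theorem zipA_loop (xs : List String) (s : List String × List String) :
    xs.foldl (fun (st : List String × List String) channel =>
        if PySem.Str.isIn " " channel then
          (st.1 ++ [zcName channel], st.2 ++ [zcKey channel])
        else
          (st.1 ++ [channel], st.2)) s =
      (s.1 ++ xs.map (fun c => if PySem.Str.isIn " " c then zcName c else c),
       s.2 ++ (xs.filter (fun c => PySem.Str.isIn " " c)).map zcKey) := by
  induction xs generalizing s with
  | nil => simp
  | cons c xs ih =>
    cases h : PySem.Str.isIn " " c with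
    | false =>
      have h' : PySem.Chars.isIn [' '] c.toList = false := by
        simpa [PySem.Str.isIn] using h
      simp only [List.foldl_cons, List.filter_cons, h, Bool.false_eq_true, if_false]
      rw [ih]; simp [h']
    | true =>
      have h' : PySem.Chars.isIn [' '] c.toList = true := by
        simpa [PySem.Str.isIn] using h
      simp only [List.foldl_cons, List.filter_cons, h, if_true]
      rw [ih]; simp [h']

-- ===== VERDICT (by name: the statement is the Claim_ definition above) =====
theorem zip_channels_spec : Claim_equal_zip_channels := by
  intro channels _ _
  unfold Spec_zip_channels
  have hsort :
      PySem.List.sorted channels (fun x => !(PySem.Str.isIn " " x)) =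
        channels.filter (fun c => PySem.Str.isIn " " c) ++
          channels.filter (fun c => !(PySem.Str.isIn " " c)) := by
    rw [sorted_bool_key]
    congr 1 <;> apply List.filter_congr <;> intro c _ <;> cases PySem.Str.isIn " " c <;> simp
  set F := channels.filter (fun c => PySem.Str.isIn " " c) with hF
  set T := channels.filter (fun c => !(PySem.Str.isIn " " c)) with hT
  have hFmem : ∀ c ∈ F, PySem.Chars.isIn [' '] c.toList = true := by
    intro c hc
    rw [hF] at hc
    have h2 := (List.mem_filter.1 hc).2
    simp at h2
    exact h2
  have hTmem : ∀ c ∈ T, PySem.Chars.isIn [' '] c.toList = false := by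
    intro c hc
    rw [hT] at hc
    have h2 := (List.mem_filter.1 hc).2
    simp at h2
    exact h2
  have hFmap : F.map (fun c => if PySem.Str.isIn " " c then zcName c else c) = F.map zcName :=
    List.map_congr_left (fun c hc => by simp [hFmem c hc])
  have hTmap : T.map (fun c => if PySem.Str.isIn " " c then zcName c else c) = T := by
    rw [List.map_congr_left (g := id) (fun c hc => by simp [hTmem c hc]), List.map_id]
  have hFfil : F.filter (fun c => PySem.Str.isIn " " c) = F :=
    List.filter_eq_self.2 (fun c hc => by simpa [PySem.Str.isIn] using hFmem c hc)
  have hTfil : T.filter (fun c => PySem.Str.isIn " " c) = [] :=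
    List.filter_eq_nil_iff.2 (fun c hc => by simp [PySem.Str.isIn, hTmem c hc])
  simp only [zip_channels, zip_channels_alt, hsort, List.foldl_append, zipA_loop,
    List.nil_append, hFmap, hTmap, hFfil, hTfil, List.map_map, ← hF, ← hT]
  have hn : ((fun p : List String => p.getD 0 "") ∘ fun c => (PySem.Str.split? c " ").getD []) = zcName :=
    funext fun c => rfl
  have hk : ((fun p : List String => p.getD 1 "") ∘ fun c => (PySem.Str.split? c " ").getD []) = zcKey :=
    funext fun c => rfl
  rw [hn, hk]
  simp
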